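-- pv_equiv track=rewrite | github.com/bbl-dres/data-catalog | prototype-canvas/scripts/generate-ibpdi-import.py | detect_junctions
-- ===== SOURCE A (Python) =====
-- JUNCTION_PREFIXES = ("Role",)
--
-- def detect_junctions(entity_attrs, entity_fk_targets):
--     """Identify pure many-to-many relation tables that exist only to bridge
--     two real entities (e.g. `ComponentSpace` between `Component` and
--     `Space`, or `RoleComponentContact` between `Component` and `Contact`).
--     They add no business meaning of their own and clutter the graph view.
--
--     Heuristic — entity is a junction if ALL of:
--       1. ≥ 2 FK columns to ≥ 2 distinct target entities (must actually be a
--          relation, not a regular table that happens to have a couple of FKs)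
--       2. Name == A+B (in either order) for some pair of target entities,
--          optionally with a `Role` prefix — this is the strong signal that
--          it's purely a bridge:
--             ComponentSpace        ↔ {Component, Space}
--             RoleComponentContact  ↔ {Component, Contact}
--       3. Total attribute count is small (≤ 10) — pure junctions carry only
--          their FK columns + maybe an audit field; role tables carry a few
--          more (role enum, validity dates) but still nothing that warrants
--          their own lifecycle. This rules out regular entities that happen
--          to share a name pattern (e.g. `UserAccount` if both `User` and
--          `Account` exist as proper entities with rich attribute sets)
--
--     Returns a set of entity names judged to be junctions.
--     """
--     junctions = set()
--     for entity, targets in entity_fk_targets.items():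
--         unique_targets = list(set(targets))
--         if len(unique_targets) < 2:
--             continue
--         if len(entity_attrs.get(entity, [])) > 10:
--             continue
--
--         # Build the list of name forms to test against A+B concat. For
--         # `RoleComponentContact` we also test `ComponentContact` so the
--         # Role-prefix wrapper doesn't hide the junction shape.
--         candidate_names = [entity]
--         for prefix in JUNCTION_PREFIXES:
--             if entity.startswith(prefix) and len(entity) > len(prefix):
--                 candidate_names.append(entity[len(prefix):])
--
--         is_concat = False
--         for cn in candidate_names:
--             for a in unique_targets:
--                 for b in unique_targets:
--                     if a != b and cn == a + b:
--                         is_concat = True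
--                         break
--                 if is_concat:
--                     break
--             if is_concat:
--                 break
--         if is_concat:
--             junctions.add(entity)
--     return junctions
-- ===== SOURCE B (Python) =====
-- JUNCTION_PREFIXES = ("Role",)
--
--
-- def _split_match(rest, pre, tset):
--     """Recursively scan split positions of a name: `pre` + `rest` is the name,
--     and at each step we test whether the two halves are distinct FK targets."""
--     p = ''.join(pre)
--     s = ''.join(rest)
--     if p in tset and s in tset and p != s:
--         return True
--     if not rest:
--         return False
--     return _split_match(rest[1:], pre + [rest[0]], tset)
--
--
-- def _is_junction(entity_attrs, entity, targets):
--     tset = set(targets)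
--     if len(tset) < 2 or len(entity_attrs.get(entity, [])) > 10:
--         return False
--     names = [entity] + [entity[len(p):] for p in JUNCTION_PREFIXES
--                         if entity.startswith(p) and len(entity) > len(p)]
--     return any(_split_match(list(n), [], tset) for n in names)
--
--
-- def detect_junctions(entity_attrs, entity_fk_targets):
--     """Same junction heuristic; instead of the flagged triple loop over
--     ordered pairs of FK targets per candidate name, a recursive scan over the
--     name's split positions tests both halves for target-set membership, and
--     the result set is a comprehension over a predicate rather than an
--     imperative accumulation."""
--     return {e for e, t in entity_fk_targets.items()
--             if _is_junction(entity_attrs, e, t)}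
-- ===== Notes on version B (the rewrite author's own statement) =====
-- stated objective: alternative
-- what changed: A's triple loop with a break flag over ordered pairs of FK targets is replaced by a recursive scan over each candidate name's split positions testing both halves for target-set membership, and the imperative set accumulation is replaced by a set comprehension over a boolean predicate.
import Mathlib
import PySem

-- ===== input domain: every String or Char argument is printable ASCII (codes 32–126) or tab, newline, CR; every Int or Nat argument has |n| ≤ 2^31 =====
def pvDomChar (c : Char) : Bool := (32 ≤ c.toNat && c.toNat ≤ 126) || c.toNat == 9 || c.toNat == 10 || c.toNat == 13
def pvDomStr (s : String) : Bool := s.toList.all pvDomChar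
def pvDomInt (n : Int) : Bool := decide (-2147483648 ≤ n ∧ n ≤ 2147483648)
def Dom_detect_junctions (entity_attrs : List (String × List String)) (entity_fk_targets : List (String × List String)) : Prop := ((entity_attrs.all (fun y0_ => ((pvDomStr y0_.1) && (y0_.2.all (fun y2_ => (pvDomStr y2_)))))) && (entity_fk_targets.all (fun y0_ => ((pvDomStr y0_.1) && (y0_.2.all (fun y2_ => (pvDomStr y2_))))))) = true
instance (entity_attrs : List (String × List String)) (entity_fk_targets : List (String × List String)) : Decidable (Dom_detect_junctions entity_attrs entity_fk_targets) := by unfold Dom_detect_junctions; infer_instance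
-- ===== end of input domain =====

-- B replaces A's flagged triple loop over ordered FK-target pairs with a recursive
-- scan over each candidate name's split positions, and the imperative set
-- accumulation with a comprehension over a predicate (objective: alternative).

-- ===== PORT A =====

-- JUNCTION_PREFIXES = ("Role",)
def pvJunctionPrefixes : List String := ["Role"]

-- candidate_names: [entity] plus, for each prefix it carries, entity with the prefix stripped
def pvCandidateNames (entity : String) : List String :=
  pvJunctionPrefixes.foldl
    (fun acc prefixStr =>
      if PySem.Str.startswith entity prefixStr
          && decide (PySem.Str.len prefixStr < PySem.Str.len entity) then
        acc ++ [PySem.Str.slice entity (some (PySem.Str.len prefixStr : Int)) none]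
      else acc)
    [entity]

-- A's triple loop with the is_concat flag and breaks = any over candidate names and ordered target pairs
def pvIsConcatA (candidate_names : List String) (unique_targets : List String) : Bool :=
  candidate_names.any (fun cn =>
    unique_targets.any (fun a =>
      unique_targets.any (fun b =>
        a != b && cn.toList == a.toList ++ b.toList)))

def detect_junctions (entity_attrs : List (String × List String)) (entity_fk_targets : List (String × List String)) : List String :=
  (PySem.Dict.ofList entity_fk_targets).items.foldl
    (fun junctions ent_tgts =>
      let entity := ent_tgts.1
      let unique_targets : PySem.Set String := PySem.Set.ofList ent_tgts.2
      if unique_targets.length < 2 then junctions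
      else if 10 < ((PySem.Dict.ofList entity_attrs).getD entity []).length then junctions
      else if pvIsConcatA (pvCandidateNames entity) unique_targets then
        PySem.Set.add junctions entity
      else junctions)
    PySem.Set.empty

-- ===== PORT B =====

-- _split_match: pre ++ rest is the name; test the current split, then recurse one char right
def pvSplitMatch (rest pre : List Char) (tset : PySem.Set String) : Bool :=
  if PySem.Set.contains tset (String.ofList pre) && PySem.Set.contains tset (String.ofList rest)
      && (String.ofList pre != String.ofList rest) then true
  else
    match rest with
    | [] => false
    | c :: rs => pvSplitMatch rs (pre ++ [c]) tset

-- names = [entity] + the comprehension over JUNCTION_PREFIXES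
def pvNamesB (entity : String) : List String :=
  [entity] ++ pvJunctionPrefixes.filterMap (fun p =>
    if PySem.Str.startswith entity p && decide (PySem.Str.len p < PySem.Str.len entity)
    then some (PySem.Str.slice entity (some (PySem.Str.len p : Int)) none) else none)

-- _is_junction: the guards collapsed into one boolean predicate
def pvIsJunction (entity_attrs : List (String × List String)) (entity : String) (targets : List String) : Bool :=
  let tset : PySem.Set String := PySem.Set.ofList targets
  if tset.length < 2 || 10 < ((PySem.Dict.ofList entity_attrs).getD entity []).length then false
  else (pvNamesB entity).any (fun n => pvSplitMatch n.toList [] tset)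

-- the set comprehension: distinct passing keys in iteration order
def detect_junctions_alt (entity_attrs : List (String × List String)) (entity_fk_targets : List (String × List String)) : List String :=
  PySem.Set.ofList
    (((PySem.Dict.ofList entity_fk_targets).items.filter
        (fun et => pvIsJunction entity_attrs et.1 et.2)).map Prod.fst)

-- ===== PRECONDITION & SPEC =====
def Spec_detect_junctions (entity_attrs : List (String × List String)) (entity_fk_targets : List (String × List String)) (out : List String) : Prop := out = detect_junctions_alt entity_attrs entity_fk_targets
instance (entity_attrs : List (String × List String)) (entity_fk_targets : List (String × List String)) (out : List String) : Decidable (Spec_detect_junctions entity_attrs entity_fk_targets out) := by unfold Spec_detect_junctions; infer_instance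

-- ===== CLAIM (what is proved, stated in full; the proofs are below) =====
def Claim_equal_detect_junctions : Prop := ∀ (entity_attrs : List (String × List String)) (entity_fk_targets : List (String × List String)), Dom_detect_junctions entity_attrs entity_fk_targets → Spec_detect_junctions entity_attrs entity_fk_targets (detect_junctions entity_attrs entity_fk_targets)

-- ===== LEMMAS AND PROOFS =====

-- splitMatch succeeds iff some split of pre ++ rest (at or right of the pre/rest seam)
-- has both halves in the set and distinct
theorem pvSplitMatch_iff (rest : List Char) : ∀ (pre : List Char) (U : PySem.Set String),
    pvSplitMatch rest pre U = true ↔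
      ∃ i ≤ rest.length, String.ofList (pre ++ rest.take i) ∈ U ∧
        String.ofList (rest.drop i) ∈ U ∧
        String.ofList (pre ++ rest.take i) ≠ String.ofList (rest.drop i) := by
  induction rest with
  | nil =>
    intro pre U
    rw [pvSplitMatch]
    by_cases h : (PySem.Set.contains U (String.ofList pre) && PySem.Set.contains U (String.ofList ([] : List Char))
        && (String.ofList pre != String.ofList ([] : List Char))) = true
    · rw [if_pos h]
      simp only [true_iff]
      simp only [Bool.and_eq_true, PySem.Set.contains_eq_listContains, List.contains_iff_mem,
        bne_iff_ne] at h
      exact ⟨0, by omega, by simpa using h.1.1, by simpa using h.1.2, by simpa using h.2⟩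
    · rw [if_neg h]
      constructor
      · intro hfalse; cases hfalse
      · rintro ⟨i, hi, h1, h2, h3⟩
        obtain rfl : i = 0 := by simpa using hi
        exact absurd (by
          simp only [Bool.and_eq_true, PySem.Set.contains_eq_listContains, List.contains_iff_mem,
            bne_iff_ne]
          exact ⟨⟨by simpa using h1, by simpa using h2⟩, by simpa using h3⟩) h
  | cons c rs ih =>
    intro pre U
    rw [pvSplitMatch]
    by_cases h : (PySem.Set.contains U (String.ofList pre) && PySem.Set.contains U (String.ofList (c :: rs))
        && (String.ofList pre != String.ofList (c :: rs))) = true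
    · rw [if_pos h]
      simp only [true_iff]
      simp only [Bool.and_eq_true, PySem.Set.contains_eq_listContains, List.contains_iff_mem,
        bne_iff_ne] at h
      exact ⟨0, by omega, by simpa using h.1.1, by simpa using h.1.2, by simpa using h.2⟩
    · rw [if_neg h, ih (pre ++ [c]) U]
      constructor
      · rintro ⟨i, hi, h1, h2, h3⟩
        refine ⟨i + 1, by simp only [List.length_cons]; omega, ?_, ?_, ?_⟩
        · simpa [List.append_assoc] using h1
        · simpa using h2
        · simpa [List.append_assoc] using h3
      · rintro ⟨i, hi, h1, h2, h3⟩
        rcases i with _ | j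
        · exfalso
          apply h
          simp only [Bool.and_eq_true, PySem.Set.contains_eq_listContains, List.contains_iff_mem,
            bne_iff_ne]
          exact ⟨⟨by simpa using h1, by simpa using h2⟩, by simpa using h3⟩
        · simp only [List.length_cons] at hi
          refine ⟨j, by omega, ?_, ?_, ?_⟩
          · simpa [List.append_assoc] using h1
          · simpa using h2
          · simpa [List.append_assoc] using h3

-- the core fact: "cn = a + b for distinct set members" = "some split of cn works"
theorem pvIsConcat_eq (candidate_names : List String) (U : PySem.Set String) :
    pvIsConcatA candidate_names U = candidate_names.any (fun n => pvSplitMatch n.toList [] U) := by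
  unfold pvIsConcatA
  rw [Bool.eq_iff_iff]
  simp only [List.any_eq_true, Bool.and_eq_true, bne_iff_ne, beq_iff_eq]
  constructor
  · rintro ⟨cn, hcn, a, ha, b, hb, hab, hsplit⟩
    refine ⟨cn, hcn, (pvSplitMatch_iff _ _ _).2 ⟨a.toList.length, ?_, ?_, ?_, ?_⟩⟩
    · rw [hsplit]; simp
    · rw [hsplit]; simpa [List.take_left] using ha
    · rw [hsplit]; simpa [List.drop_left] using hb
    · rw [hsplit, List.nil_append, List.take_left, List.drop_left]
      simpa [String.ofList_toList] using hab
  · rintro ⟨cn, hcn, hm⟩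
    obtain ⟨i, _, h1, h2, h3⟩ := (pvSplitMatch_iff _ _ _).1 hm
    refine ⟨cn, hcn, _, h1, _, h2, h3, ?_⟩
    simp [List.take_append_drop]

-- candidate_names built by foldl (A) and by list-plus-comprehension (B) coincide
theorem pvNames_eq (entity : String) : pvCandidateNames entity = pvNamesB entity := by
  unfold pvCandidateNames pvNamesB pvJunctionPrefixes
  simp only [List.foldl, List.filterMap]
  split <;> simp

-- conditional Set.add accumulation = ofList of the filtered keys
theorem foldl_condAdd (P : String × List String → Bool) :
    ∀ (l : List (String × List String)) (acc : List String),
      l.foldl (fun j et => if P et then PySem.Set.add j et.1 else j) acc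
        = ((l.filter P).map Prod.fst).foldl PySem.Set.add acc := by
  intro l
  induction l with
  | nil => intro acc; rfl
  | cons et l ih =>
    intro acc
    by_cases h : P et = true <;> simp [List.filter_cons, h, ih, List.foldl_cons]

-- ===== VERDICT (by name: the statement is the Claim_ definition above) =====
theorem detect_junctions_spec : Claim_equal_detect_junctions := by
  intro entity_attrs entity_fk_targets _
  unfold Spec_detect_junctions detect_junctions detect_junctions_alt
  rw [PySem.Set.ofList_eq_foldl, ← foldl_condAdd]
  apply List.foldl_ext
  intro j et _
  unfold pvIsJunction
  simp only [pvIsConcat_eq, pvNames_eq]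
  split_ifs with h1 h2 h3 <;> simp_all <;> omega
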